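-- pv_equiv track=rewrite | github.com/samisyd/Python | Problem.py | marcsCakewalk
-- ===== SOURCE A (Python) =====
-- def marcsCakewalk(calorie):
--     # Write your code here
--     calorie.sort()
--     sum = 0
--     exponent = 0
--     # reverse the array
--     for item in calorie[::-1]:
--         sum += item * 2**exponent
--         exponent += 1
--
--     return sum
-- ===== SOURCE B (Python) =====
-- def marcsCakewalk(calorie):
--     calorie.sort()
--     total = 0
--     for item in calorie:
--         total = total * 2 + item
--     return total
-- ===== Notes on version B (the rewrite author's own statement) =====
-- stated objective: faster
-- what changed: Replaces the reverse-and-power loop (sum += item * 2**exponent over calorie[::-1]) with a forward Horner fold total = total*2 + item over the ascending-sorted list, eliminating the reversal and all power computations; the in-place sort side effect is preserved.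
import Mathlib
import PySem

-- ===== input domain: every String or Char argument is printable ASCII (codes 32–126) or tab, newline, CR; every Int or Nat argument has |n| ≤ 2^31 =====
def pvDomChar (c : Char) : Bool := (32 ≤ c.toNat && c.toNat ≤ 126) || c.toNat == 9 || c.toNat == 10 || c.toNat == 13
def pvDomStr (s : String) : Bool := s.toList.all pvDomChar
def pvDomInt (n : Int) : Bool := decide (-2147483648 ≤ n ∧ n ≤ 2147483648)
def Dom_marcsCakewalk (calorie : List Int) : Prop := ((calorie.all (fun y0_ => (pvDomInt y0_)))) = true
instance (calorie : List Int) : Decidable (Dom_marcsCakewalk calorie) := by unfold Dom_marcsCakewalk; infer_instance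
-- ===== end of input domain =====

-- ===== PORT A =====
-- B replaces the reverse-and-power loop with a forward Horner fold over the sorted list (simpler); the in-place calorie.sort() mutation is preserved in Source B, the equivalence here is about the return value.
def marcsCakewalk (calorie : List Int) : Int :=
  let sorted := PySem.List.sorted calorie (fun x => x) false   -- calorie.sort()
  let rev := (PySem.List.slice? sorted none none (-1)).getD []  -- calorie[::-1]; step = -1 so slice? is some
  (rev.foldl (fun (p : Int × Nat) item => (p.1 + item * 2 ^ p.2, p.2 + 1)) (0, 0)).1

-- ===== PORT B =====
def marcsCakewalk_alt (calorie : List Int) : Int :=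
  let sorted := PySem.List.sorted calorie (fun x => x) false   -- calorie.sort()
  sorted.foldl (fun total item => total * 2 + item) 0

-- ===== PRECONDITION & SPEC =====
def Spec_marcsCakewalk (calorie : List Int) (out : Int) : Prop := out = marcsCakewalk_alt calorie
instance (calorie : List Int) (out : Int) : Decidable (Spec_marcsCakewalk calorie out) := by unfold Spec_marcsCakewalk; infer_instance

-- ===== CLAIM (what is proved, stated in full; the proofs are below) =====
def Claim_equal_marcsCakewalk : Prop := ∀ (calorie : List Int), Dom_marcsCakewalk calorie → Spec_marcsCakewalk calorie (marcsCakewalk calorie)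

-- ===== LEMMAS AND PROOFS =====

-- A's fold's exponent after processing l from state (s, e) is e + l.length
theorem aFold_snd (l : List Int) (s : Int) (e : Nat) :
    (l.foldl (fun (p : Int × Nat) item => (p.1 + item * 2 ^ p.2, p.2 + 1)) (s, e)).2 = e + l.length := by
  induction l generalizing s e with
  | nil => simp
  | cons x t ih => simp [List.foldl_cons, ih]; omega

-- Horner fold from accumulator a
theorem horner_acc (l : List Int) (a : Int) :
    l.foldl (fun total item => total * 2 + item) a
      = a * 2 ^ l.length + l.foldl (fun total item => total * 2 + item) 0 := by
  induction l generalizing a with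
  | nil => simp
  | cons x t ih =>
    simp only [List.foldl_cons, List.length_cons]
    rw [ih (a * 2 + x), ih (0 * 2 + x)]
    ring

-- the two loops agree on any common list l (A over l.reverse, B over l)
theorem loops_agree (l : List Int) :
    (l.reverse.foldl (fun (p : Int × Nat) item => (p.1 + item * 2 ^ p.2, p.2 + 1)) (0, 0)).1
      = l.foldl (fun total item => total * 2 + item) 0 := by
  induction l with
  | nil => simp
  | cons x t ih =>
    have hsnd := aFold_snd t.reverse 0 0
    simp only [List.reverse_cons, List.foldl_append, List.foldl_cons, List.foldl_nil,
      List.length_reverse] at *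
    rw [hsnd, ih, horner_acc t (0 * 2 + x)]
    ring

-- ===== VERDICT (by name: the statement is the Claim_ definition above) =====
theorem marcsCakewalk_spec : Claim_equal_marcsCakewalk := by
  intro calorie _
  unfold Spec_marcsCakewalk marcsCakewalk marcsCakewalk_alt
  simp only [PySem.List.slice?_none_none_neg_one, Option.getD_some]
  exact loops_agree (PySem.List.sorted calorie (fun x => x) false)
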